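-- pv_equiv track=rewrite | github.com/lacithelaci/erettlensegi | tesztverseny.py | pontok
-- ===== SOURCE A (Python) =====
-- def pontok(helyes, bekert):
--     osszeg = 0
--
--     for i in range(0, len(helyes)):
--
--         if helyes[i] == bekert[i]:
--             if i <= 4:
--                 osszeg += 3
--
--             elif i <= 9:
--                 osszeg += 4
--
--             elif i <= 12:
--                 osszeg += 5
--
--             else:
--                 osszeg += 6
--
--     return osszeg
-- ===== SOURCE B (Python) =====
-- def pontok(helyes, bekert):
--     n = len(helyes)
--     total = 0
--     for start, end, w in ((0, 5, 3), (5, 10, 4), (10, 13, 5), (13, n, 6)):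
--         cnt = 0
--         for i in range(start, min(end, n)):
--             if helyes[i] == bekert[i]:
--                 cnt += 1
--         total += w * cnt
--     return total
-- ===== Notes on version B (the rewrite author's own statement) =====
-- stated objective: alternative
-- what changed: Replaced the single index loop with a per-i nested if-chain choosing the weight by a loop over four explicit (start, end, weight) segments, counting matches per segment and adding weight*count.
import Mathlib
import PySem

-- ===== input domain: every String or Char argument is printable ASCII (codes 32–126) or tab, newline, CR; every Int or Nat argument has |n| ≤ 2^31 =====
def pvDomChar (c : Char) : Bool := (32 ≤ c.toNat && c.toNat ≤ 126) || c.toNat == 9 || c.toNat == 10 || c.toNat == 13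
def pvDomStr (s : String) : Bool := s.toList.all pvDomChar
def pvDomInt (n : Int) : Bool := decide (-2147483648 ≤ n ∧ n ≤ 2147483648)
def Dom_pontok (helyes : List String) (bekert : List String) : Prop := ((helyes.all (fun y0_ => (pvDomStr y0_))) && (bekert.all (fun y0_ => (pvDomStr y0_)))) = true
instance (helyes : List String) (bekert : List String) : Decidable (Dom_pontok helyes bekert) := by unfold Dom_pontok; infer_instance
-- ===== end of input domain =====

-- B sums weight*count over four explicit (start, end, weight) segments instead of A's per-index nested if-chain; objective: alternative decomposition.

-- ===== PORT A =====
def pontok (helyes : List String) (bekert : List String) : Int :=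
  (PySem.List.pyRange 0 (helyes.length : Int) 1).foldl
    (fun osszeg i =>
      if PySem.List.pyGetD helyes i "" = PySem.List.pyGetD bekert i "" then
        if i ≤ 4 then osszeg + 3
        else if i ≤ 9 then osszeg + 4
        else if i ≤ 12 then osszeg + 5
        else osszeg + 6
      else osszeg) 0

-- ===== PORT B =====
-- count of positions i in [start, stop) where helyes[i] == bekert[i]
def pontokSegCount (helyes : List String) (bekert : List String) (start stop : Int) : Int :=
  (PySem.List.pyRange start stop 1).foldl
    (fun cnt i =>
      if PySem.List.pyGetD helyes i "" = PySem.List.pyGetD bekert i "" then cnt + 1 else cnt) 0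

def pontok_alt (helyes : List String) (bekert : List String) : Int :=
  let n : Int := helyes.length
  [((0 : Int), (5 : Int), (3 : Int)), (5, 10, 4), (10, 13, 5), (13, n, 6)].foldl
    (fun total seg =>
      total + seg.2.2 * pontokSegCount helyes bekert seg.1 (min seg.2.1 n)) 0

-- ===== PRECONDITION & SPEC =====
-- Pre_ excludes exactly the inputs where A raises IndexError: bekert shorter than helyes.
def Pre_pontok (helyes : List String) (bekert : List String) : Prop :=
  helyes.length ≤ bekert.length
instance (helyes : List String) (bekert : List String) : Decidable (Pre_pontok helyes bekert) := by unfold Pre_pontok; infer_instance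
def pvWitness_pontok : List String × List String := (["A", "B"], ["A", "C"])

def Spec_pontok (helyes : List String) (bekert : List String) (out : Int) : Prop := out = pontok_alt helyes bekert
instance (helyes : List String) (bekert : List String) (out : Int) : Decidable (Spec_pontok helyes bekert out) := by unfold Spec_pontok; infer_instance

-- ===== CLAIM (what is proved, stated in full; the proofs are below) =====
def Claim_equal_pontok : Prop := ∀ (helyes : List String) (bekert : List String), Dom_pontok helyes bekert → Pre_pontok helyes bekert → Spec_pontok helyes bekert (pontok helyes bekert)

-- ===== LEMMAS AND PROOFS =====

-- the per-index weight A's nested if-chain assigns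
def pontokW (i : Int) : Int := if i ≤ 4 then 3 else if i ≤ 9 then 4 else if i ≤ 12 then 5 else 6

-- shifting the accumulator of the counting fold
lemma segcount_shift (p : Int → Prop) [DecidablePred p] (l : List Int) (c : Int) :
    l.foldl (fun cnt i => if p i then cnt + 1 else cnt) c
      = c + l.foldl (fun cnt i => if p i then cnt + 1 else cnt) 0 := by
  induction l generalizing c with
  | nil => simp
  | cons x xs ih =>
    simp only [List.foldl_cons]
    rw [ih, ih (if p x then 0 + 1 else 0)]
    split_ifs <;> ring

-- a weighted fold with constant weight on the list is weight * count
lemma fold_weight_eq_mul_count (p : Int → Prop) [DecidablePred p] (W : Int → Int)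
    (w : Int) (l : List Int) :
    (∀ i ∈ l, W i = w) → ∀ s : Int,
    l.foldl (fun o i => if p i then o + W i else o) s
      = s + w * l.foldl (fun cnt i => if p i then cnt + 1 else cnt) 0 := by
  induction l with
  | nil => intro _ s; simp
  | cons x xs ih =>
    intro h s
    simp only [List.foldl_cons]
    rw [ih (fun i hi => h i (List.mem_cons_of_mem _ hi)) _,
        segcount_shift p xs (if p x then 0 + 1 else 0)]
    have hx := h x (List.mem_cons_self ..)
    split_ifs
    · rw [hx]; ring
    · ring

-- splitting A's range at a segment boundary (B starts at s even when n < s: both sides are empty)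
lemma pyRange_min_eq (s e n : Int) :
    PySem.List.pyRange (min s n) (min e n) 1 = PySem.List.pyRange s (min e n) 1 := by
  rcases le_total s n with h | h
  · rw [min_eq_left h]
  · rw [min_eq_right h, PySem.List.pyRange_one_eq_nil (by omega),
        PySem.List.pyRange_one_eq_nil (by omega)]

theorem pontok_spec : Claim_equal_pontok := by
  intro helyes bekert _ _
  unfold Spec_pontok pontok pontok_alt pontokSegCount
  set n : Int := (helyes.length : Int) with hn
  have hn0 : 0 ≤ n := by positivity
  set p : Int → Prop :=
    fun i => PySem.List.pyGetD helyes i "" = PySem.List.pyGetD bekert i "" with hp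
  -- A's fold body is the weighted fold with weight pontokW
  have hbody : (fun (osszeg i : Int) =>
      if PySem.List.pyGetD helyes i "" = PySem.List.pyGetD bekert i "" then
        if i ≤ 4 then osszeg + 3
        else if i ≤ 9 then osszeg + 4
        else if i ≤ 12 then osszeg + 5
        else osszeg + 6
      else osszeg)
      = fun o i => if p i then o + pontokW i else o := by
    funext o i
    simp only [pontokW, hp]
    split_ifs <;> rfl
  rw [hbody]
  -- split A's range into the four weight segments
  have hsplit : PySem.List.pyRange 0 n 1
      = PySem.List.pyRange 0 (min 5 n) 1 ++ PySem.List.pyRange (min 5 n) (min 10 n) 1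
        ++ PySem.List.pyRange (min 10 n) (min 13 n) 1 ++ PySem.List.pyRange (min 13 n) (min n n) 1 := by
    rw [min_self]
    rw [PySem.List.pyRange_one_append 0 (min 5 n) n (by omega) (by omega),
        PySem.List.pyRange_one_append (min 5 n) (min 10 n) n (by omega) (by omega),
        PySem.List.pyRange_one_append (min 10 n) (min 13 n) n (by omega) (by omega)]
    simp [List.append_assoc]
  rw [hsplit]
  simp only [List.foldl_append]
  rw [pyRange_min_eq 5 10 n, pyRange_min_eq 10 13 n, pyRange_min_eq 13 n n]
  rw [fold_weight_eq_mul_count p pontokW 6 _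
        (fun i hi => by
          have := (PySem.List.mem_pyRange_one).1 hi
          simp only [pontokW]
          rw [if_neg (by omega), if_neg (by omega), if_neg (by omega)]) _,
      fold_weight_eq_mul_count p pontokW 5 _
        (fun i hi => by
          have := (PySem.List.mem_pyRange_one).1 hi
          simp only [pontokW]
          rw [if_neg (by omega), if_neg (by omega), if_pos (by omega)]) _,
      fold_weight_eq_mul_count p pontokW 4 _
        (fun i hi => by
          have := (PySem.List.mem_pyRange_one).1 hi
          simp only [pontokW]
          rw [if_neg (by omega), if_pos (by omega)]) _,
      fold_weight_eq_mul_count p pontokW 3 _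
        (fun i hi => by
          have := (PySem.List.mem_pyRange_one).1 hi
          simp only [pontokW]
          rw [if_pos (by omega)]) _]
  simp only [List.foldl_cons, List.foldl_nil, hp]
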